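-- pv_equiv track=rewrite | github.com/alex-pdl/e2e-web-messenger | crypto_algorithms.py | sym_decryption
-- ===== SOURCE A (Python) =====
-- def sym_decryption(cipher, key, iteration, iterations):
--     new_cipher = ""
--     while len(cipher) > len(key) or len(cipher) == len(key):
--         key += key  # Extend the key by appending itself
--     if iteration < iterations:
--         # Shift but in the opposite direction
--         for i in range(len(cipher)):
--             shift_value = int(str(ord(key[i]))[-1])
--             shifted_char = chr((ord(cipher[i]) - shift_value) % 128)  # Modulo to stay within ASCII range
--             new_cipher += shifted_char
--         # Update 'cipher' with the result of recursing
--         cipher = sym_decryption(new_cipher, key, iteration + 1, iterations)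
--     return cipher
-- ===== SOURCE B (Python) =====
-- def sym_decryption(cipher, key, iteration, iterations):
--     n = iterations - iteration
--     if n <= 0:
--         return cipher
--     m = len(key)
--     shifts = [n * (ord(ch) % 10) % 128 for ch in key]
--     return "".join(chr((ord(c) - shifts[i % m]) % 128) for i, c in enumerate(cipher))
-- ===== Notes on version B (the rewrite author's own statement) =====
-- stated objective: alternative
-- what changed: A applies one full character-shifting pass per remaining iteration via recursion (after doubling the key until it covers the cipher); B does a single closed-form pass, subtracting n*shift per character mod 128 with n = iterations - iteration and indexing the key cyclically instead of materialising the doubled key.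
-- outside the precondition, e.g. on sym_decryption('a', 'k', 0, 990): A returns 'O', B returns 'O'
import Mathlib
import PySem

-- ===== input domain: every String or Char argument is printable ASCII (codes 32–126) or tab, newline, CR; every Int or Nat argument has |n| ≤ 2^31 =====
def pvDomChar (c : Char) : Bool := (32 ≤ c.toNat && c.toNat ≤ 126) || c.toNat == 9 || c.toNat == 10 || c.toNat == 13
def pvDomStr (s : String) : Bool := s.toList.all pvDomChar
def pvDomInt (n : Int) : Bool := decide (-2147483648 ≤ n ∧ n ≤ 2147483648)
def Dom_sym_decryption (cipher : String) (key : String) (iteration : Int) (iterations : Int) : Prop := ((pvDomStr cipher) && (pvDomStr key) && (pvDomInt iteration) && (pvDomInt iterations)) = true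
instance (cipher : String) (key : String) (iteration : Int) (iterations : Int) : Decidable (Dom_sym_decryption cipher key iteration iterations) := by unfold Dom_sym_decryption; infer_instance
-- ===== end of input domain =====

-- B replaces A's per-iteration recursion (one full shifting pass per remaining iteration) by a
-- single closed-form pass subtracting n·shift per character, indexing the key cyclically instead
-- of materialising the doubled key; objective: alternative.
-- ===== PORT A =====

-- while len(cipher) > len(key) or len(cipher) == len(key): key += key
def pvExtendKey (c k : List Char) : List Char :=
  if _hk : k = [] then k
  else if c.length ≥ k.length then pvExtendKey c (k ++ k) else k
termination_by c.length + 1 - k.length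
decreasing_by
  simp only [List.length_append]
  have : 0 < k.length := List.length_pos_iff.mpr _hk
  omega

-- shift_value = int(str(ord(key[i]))[-1])
def pvDigitA (n : Int) : Int :=
  match PySem.List.pyGet? (PySem.Int.toChars n) (-1) with
  | some ch => (PySem.Int.ofChars? [ch]).getD 0
  | none => 0

-- the for-loop building new_cipher
def pvPassA (cipher key : List Char) : List Char :=
  (List.range cipher.length).foldl
    (fun acc i =>
      acc ++ [Char.ofNat ((PySem.Int.mod (((cipher.getD i ' ').toNat : Int)
        - pvDigitA (((key.getD i ' ').toNat : Int))) 128).toNat)]) []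

def pvSymRecA (cipher key : List Char) (iteration iterations : Int) : List Char :=
  let key2 := pvExtendKey cipher key
  if iteration < iterations then
    pvSymRecA (pvPassA cipher key2) key2 (iteration + 1) iterations
  else cipher
termination_by (iterations - iteration).toNat
decreasing_by omega

def sym_decryption (cipher : String) (key : String) (iteration : Int) (iterations : Int) : String :=
  String.mk (pvSymRecA cipher.toList key.toList iteration iterations)

-- ===== PORT B =====
def sym_decryption_alt (cipher : String) (key : String) (iteration : Int) (iterations : Int) : String :=
  let n : Int := iterations - iteration
  if n ≤ 0 then cipher
  else
    let m : Int := PySem.List.len key.toList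
    let shifts : List Int := key.toList.map (fun ch =>
      PySem.Int.mod (n * (PySem.Int.mod ((ch.toNat : Int)) 10)) 128)
    String.mk ((PySem.List.enumerate cipher.toList).map (fun p =>
      Char.ofNat ((PySem.Int.mod ((p.2.toNat : Int)
        - PySem.List.pyGetD shifts (PySem.Int.mod p.1 m) 0) 128).toNat)))

-- ===== PRECONDITION & SPEC =====
-- Pre_ excludes the two input families on which A does not return normally: an empty key (A's
-- key-doubling while-loop diverges; B raises ZeroDivisionError there too) and a remaining
-- iteration count iterations - iteration large enough that CPython's per-pass recursion hits the
-- default recursion limit and A raises RecursionError (the bound 980 is slightly conservative,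
-- so a sliver of inputs A still returns on is excluded; see the cite).
def Pre_sym_decryption (cipher : String) (key : String) (iteration : Int) (iterations : Int) : Prop :=
  key ≠ "" ∧ iterations - iteration < 980
instance (cipher : String) (key : String) (iteration : Int) (iterations : Int) : Decidable (Pre_sym_decryption cipher key iteration iterations) := by unfold Pre_sym_decryption; infer_instance

def pvWitness_sym_decryption : String × String × Int × Int := ("Hello", "key", 0, 3)

def Spec_sym_decryption (cipher : String) (key : String) (iteration : Int) (iterations : Int) (out : String) : Prop := out = sym_decryption_alt cipher key iteration iterations
instance (cipher : String) (key : String) (iteration : Int) (iterations : Int) (out : String) : Decidable (Spec_sym_decryption cipher key iteration iterations out) := by unfold Spec_sym_decryption; infer_instance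

-- ===== CLAIM (what is proved, stated in full; the proofs are below) =====
def Claim_equal_sym_decryption : Prop := ∀ (cipher : String) (key : String) (iteration : Int) (iterations : Int), Dom_sym_decryption cipher key iteration iterations → Pre_sym_decryption cipher key iteration iterations → Spec_sym_decryption cipher key iteration iterations (sym_decryption cipher key iteration iterations)

-- ===== LEMMAS AND PROOFS =====

theorem pvDigitA_eq_mod_ten : ∀ n : Nat, n < 127 → pvDigitA (n : Int) = ((n % 10 : Nat) : Int) := by
  decide

theorem pvExtendKey_length (c k : List Char) (hk : k ≠ []) :
    c.length < (pvExtendKey c k).length := by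
  induction k using pvExtendKey.induct (c := c) with
  | case1 => exact absurd rfl hk
  | case2 x h1 h2 ih =>
      rw [pvExtendKey]
      simp only [dif_neg h1, if_pos h2]
      exact ih (by simp [h1])
  | case3 x h1 h2 =>
      rw [pvExtendKey]
      simp only [dif_neg h1, if_neg h2]
      omega

theorem pvExtendKey_getD (c k : List Char) (hk : k ≠ []) (i : Nat) (hi : i < c.length) (d : Char) :
    (pvExtendKey c k).getD i d = k.getD (i % k.length) d := by
  induction k using pvExtendKey.induct (c := c) with
  | case1 => exact absurd rfl hk
  | case2 x h1 h2 ih =>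
      rw [pvExtendKey]
      simp only [dif_neg h1, if_pos h2]
      rw [ih (by simp [h1])]
      have hL : 0 < x.length := List.length_pos_iff.mpr h1
      have hdvd : x.length ∣ (x ++ x).length := by
        simp only [List.length_append]; exact ⟨2, by ring⟩
      have hmm : i % (x ++ x).length % x.length = i % x.length :=
        Nat.mod_mod_of_dvd i hdvd
      set j := i % (x ++ x).length with hj
      have hjlt : j < (x ++ x).length := Nat.mod_lt _ (by simp only [List.length_append]; omega)
      by_cases hcase : j < x.length
      · rw [List.getD_append _ _ _ _ hcase]
        rw [← hmm, Nat.mod_eq_of_lt hcase]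
      · have h2L : j < 2 * x.length := by
          simp only [List.length_append] at hjlt; omega
        have hgd : (x ++ x).getD j d = x.getD (j - x.length) d := by
          simp only [List.getD_eq_getElem?_getD]
          rw [List.getElem?_append_right (by omega)]
        have hsub : j % x.length = j - x.length := by
          rw [Nat.mod_eq_sub_mod (by omega), Nat.mod_eq_of_lt (by omega)]
        rw [hgd, ← hmm, hsub]
  | case3 x h1 h2 =>
      rw [pvExtendKey]
      simp only [dif_neg h1, if_neg h2]
      have : i < x.length := by omega
      rw [Nat.mod_eq_of_lt this]

theorem pvExtendKey_of_lt (c k : List Char) (hk : k ≠ []) (h : c.length < k.length) :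
    pvExtendKey c k = k := by
  rw [pvExtendKey]
  simp [hk, Nat.not_le.mpr h]

theorem pvExtendKey_ne_nil (c k : List Char) (hk : k ≠ []) : pvExtendKey c k ≠ [] :=
  List.length_pos_iff.mp (by have := pvExtendKey_length c k hk; omega)

theorem char_toNat_ofNat (n : Nat) (h : n < 128) : (Char.ofNat n).toNat = n := by
  unfold Char.ofNat
  rw [dif_pos (by left; omega)]
  simp [Char.toNat, Char.ofNatAux]

theorem pvPassA_eq_map (c k : List Char) :
    pvPassA c k = (List.range c.length).map (fun i =>
      Char.ofNat ((PySem.Int.mod (((c.getD i ' ').toNat : Int)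
        - pvDigitA (((k.getD i ' ').toNat : Int))) 128).toNat)) := by
  unfold pvPassA
  rw [PySem.List.foldl_append_singleton_eq_map]
  simp

theorem map_getD_range_self (c : List Char) :
    (List.range c.length).map (fun i => c.getD i ' ') = c := by
  apply List.ext_getElem
  · simp
  · intro i h1 h2
    simp [List.getD_eq_getElem?_getD, List.getElem?_eq_getElem h2]

theorem pvSymRecA_extend (c k : List Char) (hk : k ≠ []) (it its : Int) :
    pvSymRecA c k it its = pvSymRecA c (pvExtendKey c k) it its := by
  conv_lhs => rw [pvSymRecA]
  conv_rhs => rw [pvSymRecA]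
  rw [pvExtendKey_of_lt c (pvExtendKey c k) (pvExtendKey_ne_nil c k hk)
    (pvExtendKey_length c k hk)]

theorem emod_shift (N a d : Int) : ((a - d) % 128 - N * d) % 128 = (a - (N + 1) * d) % 128 := by
  conv_rhs => rw [show a - (N + 1) * d = a - d - N * d by ring]
  rw [Int.sub_emod, Int.sub_emod (a - d)]
  simp [Int.emod_emod_of_dvd]

theorem pvSymRecA_formula (N : Nat) : ∀ (c K : List Char) (it its : Int),
    (its - it).toNat = N → c.length < K.length →
    (∀ ch ∈ c, ch.toNat < 128) → (∀ i, i < c.length → (K.getD i ' ').toNat < 127) →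
    pvSymRecA c K it its = (List.range c.length).map (fun i =>
      Char.ofNat (((((c.getD i ' ').toNat : Int)
        - (N : Int) * (((K.getD i ' ').toNat : Int) % 10)) % 128).toNat)) := by
  induction N with
  | zero =>
      intro c K it its hN hlen hc hK
      have hKne : K ≠ [] := List.length_pos_iff.mp (by omega)
      have hits : ¬ it < its := by omega
      rw [pvSymRecA]
      simp only [pvExtendKey_of_lt c K hKne hlen, if_neg hits]
      conv_lhs => rw [← map_getD_range_self c]
      apply List.map_congr_left
      intro i hi
      rw [List.mem_range] at hi
      have hmem : c.getD i ' ' ∈ c := by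
        rw [List.getD_eq_getElem?_getD, List.getElem?_eq_getElem hi]
        exact List.getElem_mem hi
      have h128 : (c.getD i ' ').toNat < 128 := hc _ hmem
      have hmod : (((c.getD i ' ').toNat : Int)) % 128 = ((c.getD i ' ').toNat : Int) :=
        Int.emod_eq_of_lt (by positivity) (by exact_mod_cast h128)
      simp only [Nat.cast_zero, zero_mul, sub_zero, hmod, Int.toNat_natCast,
        Char.ofNat_toNat]
  | succ N ih =>
      intro c K it its hN hlen hc hK
      have hKne : K ≠ [] := List.length_pos_iff.mp (by omega)
      have hit : it < its := by omega
      rw [pvSymRecA]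
      simp only [pvExtendKey_of_lt c K hKne hlen, if_pos hit]
      have hmap := pvPassA_eq_map c K
      have hlen' : (pvPassA c K).length = c.length := by rw [hmap]; simp
      have hgetD : ∀ i, i < c.length → (pvPassA c K).getD i ' ' =
          Char.ofNat ((PySem.Int.mod (((c.getD i ' ').toNat : Int)
            - pvDigitA (((K.getD i ' ').toNat : Int))) 128).toNat) := by
        intro i hi
        rw [hmap, List.getD_eq_getElem?_getD, List.getElem?_map, List.getElem?_range hi]
        rfl
      have hmodlt : ∀ x : Int, (PySem.Int.mod x 128).toNat < 128 := by
        intro x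
        have h1 := PySem.Int.mod_lt x (b := 128) (by norm_num)
        have h2 := PySem.Int.mod_nonneg x (b := 128) (by norm_num)
        omega
      have hc' : ∀ ch ∈ pvPassA c K, ch.toNat < 128 := by
        intro ch hch
        rw [hmap, List.mem_map] at hch
        obtain ⟨i, _, rfl⟩ := hch
        rw [char_toNat_ofNat _ (hmodlt _)]
        exact hmodlt _
      rw [ih (pvPassA c K) K (it + 1) its (by omega) (by omega) hc'
        (by intro i hi; exact hK i (by omega))]
      rw [hlen']
      apply List.map_congr_left
      intro i hi
      rw [List.mem_range] at hi
      have hmem : c.getD i ' ' ∈ c := by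
        rw [List.getD_eq_getElem?_getD, List.getElem?_eq_getElem hi]
        exact List.getElem_mem hi
      have h128 : (c.getD i ' ').toNat < 128 := hc _ hmem
      have hK127 := hK i hi
      rw [hgetD i hi, char_toNat_ofNat _ (hmodlt _)]
      rw [PySem.Int.mod_eq_emod_of_pos (by norm_num)]
      rw [Int.toNat_of_nonneg (Int.emod_nonneg _ (by norm_num))]
      rw [pvDigitA_eq_mod_ten _ hK127]
      congr 1
      push_cast
      rw [emod_shift]

theorem toList_ne_nil (s : String) (h : s ≠ "") : s.toList ≠ [] := by
  intro hh
  exact h (by cases s; simp_all)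

theorem map_mod_id (c : List Char) (hc : ∀ ch ∈ c, ch.toNat < 128) :
    (List.range c.length).map (fun i =>
      Char.ofNat (((((c.getD i ' ').toNat : Int)) % 128).toNat)) = c := by
  conv_rhs => rw [← map_getD_range_self c]
  apply List.map_congr_left
  intro i hi
  rw [List.mem_range] at hi
  have hmem : c.getD i ' ' ∈ c := by
    rw [List.getD_eq_getElem?_getD, List.getElem?_eq_getElem hi]
    exact List.getElem_mem hi
  have h128 : (c.getD i ' ').toNat < 128 := hc _ hmem
  have hmod : (((c.getD i ' ').toNat : Int)) % 128 = ((c.getD i ' ').toNat : Int) :=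
    Int.emod_eq_of_lt (by positivity) (by exact_mod_cast h128)
  rw [hmod, Int.toNat_natCast, Char.ofNat_toNat]

theorem string_mk_toList (s : String) : String.mk s.toList = s := by
  simp [String.mk]

-- ===== VERDICT (by name: the statement is the Claim_ definition above) =====
theorem sym_decryption_spec : Claim_equal_sym_decryption := by
  intro cipher key it its hDom hPre
  unfold Spec_sym_decryption
  obtain ⟨hkey, _⟩ := hPre
  have hkne : key.toList ≠ [] := toList_ne_nil key hkey
  have hL : 0 < key.toList.length := List.length_pos_iff.mpr hkne
  unfold Dom_sym_decryption at hDom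
  simp only [Bool.and_eq_true] at hDom
  have hcDom : ∀ ch ∈ cipher.toList, ch.toNat < 128 := by
    intro ch hch
    have := List.all_eq_true.mp hDom.1.1.1 ch hch
    unfold pvDomChar at this
    simp at this
    omega
  have hkDom : ∀ ch ∈ key.toList, ch.toNat < 127 := by
    intro ch hch
    have := List.all_eq_true.mp hDom.1.1.2 ch hch
    unfold pvDomChar at this
    simp at this
    omega
  have hKlen : cipher.toList.length < (pvExtendKey cipher.toList key.toList).length :=
    pvExtendKey_length cipher.toList key.toList hkne
  have hKDom : ∀ i, i < cipher.toList.length →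
      ((pvExtendKey cipher.toList key.toList).getD i ' ').toNat < 127 := by
    intro i hi
    rw [pvExtendKey_getD cipher.toList key.toList hkne i hi]
    have hlt : i % key.toList.length < key.toList.length := Nat.mod_lt _ hL
    rw [List.getD_eq_getElem?_getD, List.getElem?_eq_getElem hlt]
    exact hkDom _ (List.getElem_mem hlt)
  unfold sym_decryption sym_decryption_alt
  rw [pvSymRecA_extend cipher.toList key.toList hkne,
    pvSymRecA_formula ((its - it).toNat) _ _ it its rfl hKlen hcDom hKDom]
  by_cases hgap : its - it ≤ 0
  · rw [if_pos hgap]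
    have hN0 : (its - it).toNat = 0 := by omega
    rw [hN0]
    simp only [Nat.cast_zero, zero_mul, sub_zero]
    rw [map_mod_id cipher.toList hcDom, string_mk_toList]
  · rw [if_neg hgap]
    congr 1
    rw [PySem.List.enumerate_eq_map_pyRange (d := ' ')]
    simp only [PySem.List.len_eq]
    rw [PySem.List.pyRange_zero_natCast, List.map_map, List.map_map]
    apply List.map_congr_left
    intro i hi
    rw [List.mem_range] at hi
    simp only [Function.comp_apply, PySem.List.pyGetD_natCast, PySem.Int.mod_natCast]
    have hlt : i % key.toList.length < key.toList.length := Nat.mod_lt _ hL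
    have hgetDmap : (key.toList.map (fun ch =>
        PySem.Int.mod ((its - it) * (PySem.Int.mod ((ch.toNat : Int)) 10)) 128)).getD
          (i % key.toList.length) 0
        = PySem.Int.mod ((its - it) *
            (PySem.Int.mod (((key.toList.getD (i % key.toList.length) ' ').toNat : Int)) 10)) 128 := by
      rw [List.getD_eq_getElem?_getD, List.getElem?_map, List.getElem?_eq_getElem hlt]
      rw [List.getD_eq_getElem?_getD, List.getElem?_eq_getElem hlt]
      rfl
    rw [hgetDmap]
    rw [pvExtendKey_getD cipher.toList key.toList hkne i hi]
    rw [PySem.Int.mod_eq_emod_of_pos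
        (a := (((key.toList.getD (i % key.toList.length) ' ').toNat : Int))) (by norm_num),
      PySem.Int.mod_eq_emod_of_pos (a := (its - it) * _) (by norm_num),
      PySem.Int.mod_eq_emod_of_pos (by norm_num)]
    have hcast : (((its - it).toNat : Int)) = its - it := by omega
    rw [hcast]
    have habs : ∀ a b : Int, (a - b % 128) % 128 = (a - b) % 128 := by
      intro a b
      conv_lhs => rw [Int.sub_emod]
      conv_rhs => rw [Int.sub_emod]
      rw [Int.emod_emod_of_dvd _ dvd_rfl]
    rw [habs]
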